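-- pv_equiv track=rewrite | github.com/atvKail/solve | USE/ПолноценноеРешениеВариантов/Aprobatsia_14_05_2025I/25.py | has_valid_divisor
-- ===== SOURCE A (Python) =====
-- def has_valid_divisor(n):
--     mdiv = None
--
--     for d in range(1, int(n**0.5) + 1):
--         if n % d == 0:
--             if d != 7 and d != n and d % 10 == 7:
--                 if mdiv is None or d < mdiv:
--                     mdiv = d
--
--             if n // d != 7 and n // d != n and (n // d) % 10 == 7:
--                 if mdiv is None or n // d < mdiv:
--                     mdiv = n // d
--     return mdiv
-- ===== SOURCE B (Python) =====
-- def has_valid_divisor(n):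
--     s = int(n ** 0.5)
--     # phase 1: ascending scan of small candidates ending in seven;
--     # the first hit is the smallest valid divisor, so return immediately.
--     for k in range(17, s + 1, 10):
--         if n % k == 0:
--             return k
--     # phase 2: no valid divisor <= sqrt(n); scan cofactors q = n // d with d
--     # descending, so q is ascending across divisors -> first valid q is smallest.
--     for d in range(s, 0, -1):
--         if n % d == 0:
--             q = n // d
--             if q % 10 == 7 and q != 7 and q != n:
--                 return q
--     return None
-- ===== Notes on version B (the rewrite author's own statement) =====
-- stated objective: simpler
-- what changed: Instead of scanning all d up to sqrt(n) while tracking a running minimum over both members of each divisor pair, B does two early-returning directional scans: ascending over the candidates ending in seven up to sqrt(n) (the first hit is the smallest), then, only if none, descending over the small cofactors so the large cofactors appear in ascending order and the first valid one is returned; no min-tracking state at all.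
import Mathlib
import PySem

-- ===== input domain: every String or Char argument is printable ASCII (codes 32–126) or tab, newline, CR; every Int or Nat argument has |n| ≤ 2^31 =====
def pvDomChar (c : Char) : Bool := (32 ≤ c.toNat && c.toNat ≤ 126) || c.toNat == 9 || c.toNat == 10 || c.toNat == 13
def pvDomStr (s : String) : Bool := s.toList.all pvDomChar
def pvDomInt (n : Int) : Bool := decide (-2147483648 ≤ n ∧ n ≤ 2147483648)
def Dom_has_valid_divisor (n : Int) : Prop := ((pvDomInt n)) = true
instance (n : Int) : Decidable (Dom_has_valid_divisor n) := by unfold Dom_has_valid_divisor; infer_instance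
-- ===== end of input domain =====

-- B replaces A's sqrt-scan with min-tracking over both members of each divisor pair by two
-- early-returning directional scans (ascending small candidates, then descending cofactors);
-- same square-root cost, no min state. Return values proved equal on all of Pre_ within Dom.

-- ===== PORT A =====
-- Python's `int(n**0.5)` is ported as Nat.sqrt n.toNat: exact for the nonnegative inputs of Dom (the
-- float sqrt cannot cross an integer boundary at this magnitude); negative n (TypeError) is
-- outside Pre_.
-- The loop body, transliterated (mdiv is the accumulator, d the loop variable):
def stepA (n : Int) (mdiv : Option Int) (d : Int) : Option Int :=
  if PySem.Int.mod n d = 0 then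
    let mdiv1 :=
      if d ≠ 7 ∧ d ≠ n ∧ PySem.Int.mod d 10 = 7 then
        match mdiv with
        | none => some d
        | some m => if d < m then some d else some m
      else mdiv
    if PySem.Int.floordiv n d ≠ 7 ∧ PySem.Int.floordiv n d ≠ n ∧
        PySem.Int.mod (PySem.Int.floordiv n d) 10 = 7 then
      match mdiv1 with
      | none => some (PySem.Int.floordiv n d)
      | some m => if PySem.Int.floordiv n d < m then some (PySem.Int.floordiv n d) else some m
    else mdiv1
  else mdiv

def has_valid_divisor (n : Int) : Option Int :=
  (PySem.List.pyRange 1 ((Nat.sqrt n.toNat : Int) + 1) 1).foldl (stepA n) none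

-- ===== PORT B =====
-- Transliteration of Source B: phase 1 is the ascending early-return scan over the candidates
-- ending in seven (a `for` loop with `return` inside = List.find?); phase 2 the descending
-- cofactor scan.
def has_valid_divisor_alt (n : Int) : Option Int :=
  let s : Int := (Nat.sqrt n.toNat : Int)   -- int(n ** 0.5), see comment on port A
  match (PySem.List.pyRange 17 (s + 1) 10).find? (fun k => PySem.Int.mod n k == 0) with
  | some k => some k
  | none =>
      ((PySem.List.pyRange s 0 (-1)).find? (fun d =>
          PySem.Int.mod n d == 0 &&
            (PySem.Int.mod (PySem.Int.floordiv n d) 10 == 7 &&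
              (PySem.Int.floordiv n d != 7 && PySem.Int.floordiv n d != n)))).map
        (fun d => PySem.Int.floordiv n d)

-- ===== PRECONDITION & SPEC =====
-- Pre_ excludes exactly the negative inputs, where Python A raises TypeError (int() of a
-- complex square root); Source B raises the same way there.
def Pre_has_valid_divisor (n : Int) : Prop := 0 ≤ n
instance (n : Int) : Decidable (Pre_has_valid_divisor n) := by
  unfold Pre_has_valid_divisor; infer_instance
def pvWitness_has_valid_divisor : Int := (187)

def Spec_has_valid_divisor (n : Int) (out : Option Int) : Prop := out = has_valid_divisor_alt n
instance (n : Int) (out : Option Int) : Decidable (Spec_has_valid_divisor n out) := by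
  unfold Spec_has_valid_divisor; infer_instance

-- ===== CLAIM (what is proved, stated in full; the proofs are below) =====
def Claim_equal_has_valid_divisor : Prop :=
  ∀ (n : Int), Dom_has_valid_divisor n → Pre_has_valid_divisor n →
    Spec_has_valid_divisor n (has_valid_divisor n)

-- ===== LEMMAS AND PROOFS =====

-- "k is a value A may report for n": a divisor of n ending in 7, other than 7 and n itself.
def VK (n k : Int) : Prop := k ≠ 7 ∧ k ≠ n ∧ k % 10 = 7
def Vb (n k : Int) : Prop := 0 < k ∧ k ∣ n ∧ VK n k

-- r is the minimum of the set P (none ↔ P empty).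
def MinOpt (P : Int → Prop) : Option Int → Prop
  | none => ∀ k, ¬ P k
  | some m => P m ∧ ∀ k, P k → m ≤ k

-- candidates produced by A's loop over d = 1 … t
def Cand (n t k : Int) : Prop :=
  ∃ d, 1 ≤ d ∧ d ≤ t ∧ n % d = 0 ∧ (k = d ∨ k = n / d) ∧ VK n k

-- the "mdiv is None or x < mdiv" update of A's loop, as a function
def updMin (r : Option Int) (x : Int) : Option Int :=
  match r with
  | none => some x
  | some m => if x < m then some x else some m

theorem stepA_eq2 (n d : Int) (hd : 0 < d) (r : Option Int) :
    stepA n r d =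
      if n % d = 0 then
        (if n / d ≠ 7 ∧ n / d ≠ n ∧ (n / d) % 10 = 7 then
          updMin (if d ≠ 7 ∧ d ≠ n ∧ d % 10 = 7 then updMin r d else r) (n / d)
        else (if d ≠ 7 ∧ d ≠ n ∧ d % 10 = 7 then updMin r d else r))
      else r := by
  unfold stepA updMin
  rw [PySem.Int.mod_eq_emod_of_pos hd, PySem.Int.floordiv_eq_ediv_of_pos hd,
    PySem.Int.mod_eq_emod_of_pos (show (0:Int) < 10 by norm_num),
    PySem.Int.mod_eq_emod_of_pos (show (0:Int) < 10 by norm_num)]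
  try (cases r <;> split_ifs <;> try rfl)

theorem minopt_congr {P Q : Int → Prop} {r : Option Int} (h : ∀ k, P k ↔ Q k)
    (hr : MinOpt P r) : MinOpt Q r := by
  cases r with
  | none => intro k hk; exact hr k ((h k).mpr hk)
  | some m => exact ⟨(h m).mp hr.1, fun k hk => hr.2 k ((h k).mpr hk)⟩

theorem minopt_unique {P : Int → Prop} {r r' : Option Int}
    (h : MinOpt P r) (h' : MinOpt P r') : r = r' := by
  cases r with
  | none =>
    cases r' with
    | none => rfl
    | some m' => exact absurd h'.1 (h m')
  | some m =>
    cases r' with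
    | none => exact absurd h.1 (h' m)
    | some m' =>
      have h1 := h.2 m' h'.1
      have h2 := h'.2 m h.1
      simp [le_antisymm h1 h2]

theorem minopt_update {P : Int → Prop} {r : Option Int} (x : Int) (hr : MinOpt P r) :
    MinOpt (fun k => P k ∨ k = x) (updMin r x) := by
  unfold updMin
  cases r with
  | none =>
    refine ⟨Or.inr rfl, fun k hk => ?_⟩
    rcases hk with hk | hk
    · exact absurd hk (hr k)
    · omega
  | some m =>
    by_cases hx : x < m
    · simp only [if_pos hx]
      refine ⟨Or.inr rfl, fun k hk => ?_⟩
      rcases hk with hk | hk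
      · have := hr.2 k hk; omega
      · omega
    · simp only [if_neg hx]
      refine ⟨Or.inl hr.1, fun k hk => ?_⟩
      rcases hk with hk | hk
      · exact hr.2 k hk
      · have := hr.1; omega

theorem minopt_condupdate {P : Int → Prop} {r : Option Int} (x : Int) (C : Prop)
    [Decidable C] (hr : MinOpt P r) :
    MinOpt (fun k => P k ∨ (k = x ∧ C)) (if C then updMin r x else r) := by
  by_cases hC : C
  · simp only [if_pos hC]
    refine minopt_congr (fun k => ?_) (minopt_update x hr)
    constructor
    · rintro (h | h)
      · exact Or.inl h
      · exact Or.inr ⟨h, hC⟩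
    · rintro (h | ⟨h, _⟩)
      · exact Or.inl h
      · exact Or.inr h
  · simp only [if_neg hC]
    refine minopt_congr (fun k => ?_) hr
    constructor
    · exact Or.inl
    · rintro (h | ⟨_, h⟩)
      · exact h
      · exact absurd h hC

theorem stepA_minopt (n d : Int) (hn : 0 < n) (hd : 1 ≤ d) {r : Option Int}
    (hr : MinOpt (Cand n (d - 1)) r) : MinOpt (Cand n d) (stepA n r d) := by
  rw [stepA_eq2 n d (by omega) r]
  by_cases hmod : n % d = 0
  · simp only [if_pos hmod]
    have h1 := minopt_condupdate (P := Cand n (d - 1)) d (d ≠ 7 ∧ d ≠ n ∧ d % 10 = 7) hr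
    have h2 := minopt_condupdate (n / d) (n / d ≠ 7 ∧ n / d ≠ n ∧ (n / d) % 10 = 7) h1
    refine minopt_congr (fun k => ?_) h2
    constructor
    · rintro ((⟨d', h1', h2', h3', h4', h5'⟩ | ⟨rfl, hC⟩) | ⟨rfl, hC⟩)
      · exact ⟨d', h1', by omega, h3', h4', h5'⟩
      · exact ⟨k, hd, le_refl k, hmod, Or.inl rfl, hC⟩
      · exact ⟨d, hd, le_refl d, hmod, Or.inr rfl, hC⟩
    · rintro ⟨d', h1', h2', h3', h4', h5'⟩
      by_cases hcase : d' = d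
      · subst hcase
        rcases h4' with rfl | rfl
        · exact Or.inl (Or.inr ⟨rfl, h5'⟩)
        · exact Or.inr ⟨rfl, h5'⟩
      · exact Or.inl (Or.inl ⟨d', h1', by omega, h3', h4', h5'⟩)
  · simp only [if_neg hmod]
    refine minopt_congr (fun k => ?_) hr
    constructor
    · rintro ⟨d', h1', h2', h3', h4', h5'⟩
      exact ⟨d', h1', by omega, h3', h4', h5'⟩
    · rintro ⟨d', h1', h2', h3', h4', h5'⟩
      by_cases hcase : d' = d
      · subst hcase; exact absurd h3' hmod
      · exact ⟨d', h1', by omega, h3', h4', h5'⟩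

theorem foldA_minopt (n : Int) (hn : 0 < n) (t : Nat) :
    MinOpt (Cand n t) ((PySem.List.pyRange 1 ((t : Int) + 1) 1).foldl (stepA n) none) := by
  induction t with
  | zero =>
    rw [PySem.List.pyRange_one_eq_nil (by norm_num)]
    intro k hk
    obtain ⟨d, h1, h2, _⟩ := hk
    omega
  | succ t ih =>
    have hsplit : PySem.List.pyRange 1 ((t : Int) + 1 + 1) 1 =
        PySem.List.pyRange 1 ((t : Int) + 1) 1 ++ [(t : Int) + 1] :=
      PySem.List.pyRange_one_succ_right (by omega)
    push_cast
    rw [hsplit, List.foldl_append]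
    simp only [List.foldl_cons, List.foldl_nil]
    have := stepA_minopt n ((t : Int) + 1) hn (by omega)
      (r := (PySem.List.pyRange 1 ((t : Int) + 1) 1).foldl (stepA n) none)
      (by simpa using ih)
    simpa using this

-- every valid divisor is a candidate of A's loop up to sqrt n, and conversely
theorem cand_iff_vb (n : Int) (hn : 0 < n) (k : Int) :
    Cand n ((Nat.sqrt n.toNat : Nat) : Int) k ↔ Vb n k := by
  set s : Int := ((Nat.sqrt n.toNat : Nat) : Int) with hs
  have hntn : ((n.toNat : Int)) = n := Int.toNat_of_nonneg (by omega)
  have hsq : s * s ≤ n := by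
    have := Nat.sqrt_le' n.toNat
    have : ((Nat.sqrt n.toNat ^ 2 : Nat) : Int) ≤ ((n.toNat : Int)) := by exact_mod_cast this
    rw [hntn] at this
    push_cast at this
    nlinarith [this]
  have hsq2 : n < (s + 1) * (s + 1) := by
    have := Nat.lt_succ_sqrt' n.toNat
    have : ((n.toNat : Int)) < ((Nat.sqrt n.toNat).succ ^ 2 : Nat) := by exact_mod_cast this
    rw [hntn] at this
    push_cast at this
    nlinarith [this]
  have hs0 : 0 ≤ s := by positivity
  constructor
  · rintro ⟨d, h1, h2, h3, h4, h5⟩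
    have hdvd : d ∣ n := Int.dvd_of_emod_eq_zero h3
    have hq : n / d * d = n := Int.ediv_mul_cancel hdvd
    rcases h4 with rfl | rfl
    · exact ⟨by omega, hdvd, h5⟩
    · have hqdvd : n / d ∣ n := ⟨d, hq.symm⟩
      have hqpos : 0 < n / d := by
        rcases lt_trichotomy (n / d) 0 with h | h | h
        · nlinarith
        · rw [h] at hq; simp at hq; omega
        · exact h
      exact ⟨hqpos, hqdvd, h5⟩
  · rintro ⟨hk0, hkdvd, hVK⟩
    have hmodk : n % k = 0 := Int.emod_eq_zero_of_dvd hkdvd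
    have hkn : k ≤ n := Int.le_of_dvd hn hkdvd
    by_cases hks : k ≤ s
    · exact ⟨k, by omega, hks, hmodk, Or.inl rfl, hVK⟩
    · -- k > s: witness d = n / k ≤ s
      push_neg at hks
      have hq : n / k * k = n := Int.ediv_mul_cancel hkdvd
      have hd1 : 1 ≤ n / k := by
        rcases lt_trichotomy (n / k) 0 with h | h | h
        · nlinarith
        · rw [h] at hq; simp at hq; omega
        · omega
      have hd2 : n / k ≤ s := by
        by_contra hcon
        push_neg at hcon
        nlinarith
      have hmodd : n % (n / k) = 0 := Int.emod_eq_zero_of_dvd ⟨k, hq.symm⟩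
      have hback : n / (n / k) = k := by
        have h := Int.mul_ediv_cancel_left (a := n / k) k (show n / k ≠ 0 by omega)
        rwa [hq] at h
      exact ⟨n / k, hd1, hd2, hmodd, Or.inr hback.symm, hVK⟩

theorem A_char (n : Int) (hn : 0 < n) : MinOpt (Vb n) (has_valid_divisor n) := by
  unfold has_valid_divisor
  exact minopt_congr (cand_iff_vb n hn) (foldA_minopt n hn (Nat.sqrt n.toNat))

-- find? on a list that is pairwise R returns an R-first match
theorem find?_pairwise_first {α : Type} (R : α → α → Prop) (p : α → Bool) :
    ∀ (l : List α), l.Pairwise R →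
      (∀ x, l.find? p = some x → x ∈ l ∧ p x = true ∧ ∀ y ∈ l, p y = true → y = x ∨ R x y) ∧
      (l.find? p = none → ∀ y ∈ l, p y = false)
  | [], _ => by simp
  | a :: l, h => by
    have hrest := find?_pairwise_first R p l (List.Pairwise.of_cons h)
    by_cases ha : p a = true
    · refine ⟨fun x hx => ?_, fun hx => ?_⟩
      · rw [List.find?_cons_of_pos ha] at hx
        injection hx with hx
        subst hx
        refine ⟨List.mem_cons_self, ha, fun y hy _ => ?_⟩
        rcases List.mem_cons.mp hy with rfl | hy
        · exact Or.inl rfl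
        · exact Or.inr ((List.pairwise_cons.mp h).1 y hy)
      · rw [List.find?_cons_of_pos ha] at hx
        exact absurd hx (by simp)
    · refine ⟨fun x hx => ?_, fun hx => ?_⟩
      · rw [List.find?_cons_of_neg ha] at hx
        obtain ⟨h1, h2, h3⟩ := hrest.1 x hx
        refine ⟨List.mem_cons_of_mem a h1, h2, fun y hy hpy => ?_⟩
        rcases List.mem_cons.mp hy with rfl | hy
        · exact absurd hpy ha
        · exact h3 y hy hpy
      · rw [List.find?_cons_of_neg ha] at hx
        intro y hy
        rcases List.mem_cons.mp hy with rfl | hy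
        · simpa using ha
        · exact hrest.2 hx y hy

theorem pairwise_lt_pyRange_pos (a b s : Int) (hs : 0 < s) :
    (PySem.List.pyRange a b s).Pairwise (· < ·) := by
  rw [PySem.List.pyRange_of_pos a b hs]
  rw [List.pairwise_map]
  refine List.Pairwise.imp_of_mem ?_ (List.pairwise_lt_range)
  intro x y _ _ hxy
  have : (x : Int) < (y : Int) := by exact_mod_cast hxy
  nlinarith

-- arithmetic shape of valid divisors: ends in 7, not 7 itself ⇒ at least 17
theorem vb_ge_17 {n k : Int} (h : Vb n k) : 17 ≤ k := by
  obtain ⟨h0, _, h7, _, h10⟩ := h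
  omega

theorem B_char (n : Int) (hn : 2 ≤ n) : MinOpt (Vb n) (has_valid_divisor_alt n) := by
  unfold has_valid_divisor_alt
  dsimp only
  set s : Int := ((Nat.sqrt n.toNat : Nat) : Int) with hsdef
  have hntn : ((n.toNat : Int)) = n := Int.toNat_of_nonneg (by omega)
  have hs0 : 0 ≤ s := by positivity
  have hsq : s * s ≤ n := by
    have := Nat.sqrt_le' n.toNat
    have : ((Nat.sqrt n.toNat ^ 2 : Nat) : Int) ≤ ((n.toNat : Int)) := by exact_mod_cast this
    rw [hntn] at this; push_cast at this; nlinarith [this]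
  have hsq2 : n < (s + 1) * (s + 1) := by
    have := Nat.lt_succ_sqrt' n.toNat
    have : ((n.toNat : Int)) < ((Nat.sqrt n.toNat).succ ^ 2 : Nat) := by exact_mod_cast this
    rw [hntn] at this; push_cast at this; nlinarith [this]
  have hsn : s < n := by
    have h1 : 1 < n.toNat := by omega
    have := Nat.sqrt_lt_self h1
    have : ((Nat.sqrt n.toNat : Nat) : Int) < ((n.toNat : Int)) := by exact_mod_cast this
    omega
  -- membership in the phase-1 candidate list
  have hmem1 : ∀ k : Int, k ∈ PySem.List.pyRange 17 (s + 1) 10 ↔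
      17 ≤ k ∧ k ≤ s ∧ k % 10 = 7 := by
    intro k
    rw [PySem.List.mem_pyRange_iff_of_pos (by norm_num)]
    constructor
    · rintro ⟨h1, h2, c, hc⟩; omega
    · rintro ⟨h1, h2, h3⟩
      exact ⟨h1, by omega, ⟨(k - 17) / 10, by omega⟩⟩
  have hp1 : ∀ k : Int, (PySem.Int.mod n k == 0) = true ↔ n % k = 0 := by
    intro k
    rw [beq_iff_eq, PySem.Int.mod_eq_zero_iff_dvd]
    exact ⟨fun h => Int.emod_eq_zero_of_dvd h, fun h => Int.dvd_of_emod_eq_zero h⟩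
  -- a member of the phase-1 list that divides n is a valid divisor, and conversely
  -- valid divisors ≤ s are exactly the phase-1 hits
  have hvb1 : ∀ k : Int, (k ∈ PySem.List.pyRange 17 (s + 1) 10 ∧ n % k = 0) ↔
      (Vb n k ∧ k ≤ s) := by
    intro k
    rw [hmem1]
    constructor
    · rintro ⟨⟨h1, h2, h3⟩, h4⟩
      exact ⟨⟨by omega, Int.dvd_of_emod_eq_zero h4, by omega, by omega, h3⟩, h2⟩
    · rintro ⟨hvb, hks⟩
      exact ⟨⟨vb_ge_17 hvb, hks, hvb.2.2.2.2⟩, Int.emod_eq_zero_of_dvd hvb.2.1⟩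
  have hfirst1 := find?_pairwise_first (· < ·) (fun k => PySem.Int.mod n k == 0)
    (PySem.List.pyRange 17 (s + 1) 10) (pairwise_lt_pyRange_pos _ _ _ (by norm_num))
  cases hf1 : (PySem.List.pyRange 17 (s + 1) 10).find? (fun k => PySem.Int.mod n k == 0) with
  | some k =>
    obtain ⟨hk1, hk2, hk3⟩ := hfirst1.1 k hf1
    have hkvb : Vb n k ∧ k ≤ s := (hvb1 k).mp ⟨hk1, (hp1 k).mp hk2⟩
    refine ⟨hkvb.1, fun j hj => ?_⟩
    by_cases hjs : j ≤ s
    · have hjmem := (hvb1 j).mpr ⟨hj, hjs⟩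
      rcases hk3 j hjmem.1 ((hp1 j).mpr hjmem.2) with heq | h
      · exact le_of_eq heq.symm
      · omega
    · omega
  | none =>
    -- no valid divisor ≤ s
    have hnone1 : ∀ j : Int, Vb n j → s < j := by
      intro j hj
      by_contra hcon
      push_neg at hcon
      have hjmem := (hvb1 j).mpr ⟨hj, hcon⟩
      have := hfirst1.2 hf1 j hjmem.1
      exact absurd ((hp1 j).mpr hjmem.2) (by simpa using this)
    -- phase 2
    have hpair2 : (PySem.List.pyRange s 0 (-1)).Pairwise (· > ·) := by
      rw [PySem.List.pyRange_neg_one_eq_reverse, List.pairwise_reverse]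
      exact pairwise_lt_pyRange_pos _ _ _ (by norm_num)
    set p2 : Int → Bool := fun d =>
      PySem.Int.mod n d == 0 &&
        (PySem.Int.mod (PySem.Int.floordiv n d) 10 == 7 &&
          (PySem.Int.floordiv n d != 7 && PySem.Int.floordiv n d != n)) with hp2def
    have hmem2 : ∀ d : Int, d ∈ PySem.List.pyRange s 0 (-1) ↔ 0 < d ∧ d ≤ s := by
      intro d
      rw [PySem.List.pyRange_neg_one_eq_reverse, List.mem_reverse,
        PySem.List.mem_pyRange_one]
      omega
    -- unpack p2 for positive d
    have hp2 : ∀ d : Int, 0 < d → (p2 d = true ↔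
        n % d = 0 ∧ (n / d) % 10 = 7 ∧ n / d ≠ 7 ∧ n / d ≠ n) := by
      intro d hd
      rw [hp2def]
      simp only [Bool.and_eq_true, beq_iff_eq, bne_iff_ne]
      rw [PySem.Int.floordiv_eq_ediv_of_pos hd,
        PySem.Int.mod_eq_emod_of_pos hd,
        PySem.Int.mod_eq_emod_of_pos (show (0:Int) < 10 by norm_num)]
      try tauto
    -- p2 d holds iff n / d is a valid divisor (for d in the list, given phase 1 failed)
    have hfirst2 := find?_pairwise_first (· > ·) p2 (PySem.List.pyRange s 0 (-1)) hpair2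
    cases hf2 : (PySem.List.pyRange s 0 (-1)).find? p2 with
    | some d =>
      obtain ⟨hd1, hd2, hd3⟩ := hfirst2.1 d hf2
      obtain ⟨hdpos, hds⟩ := (hmem2 d).mp hd1
      obtain ⟨hmodd, hq10, hq7, hqn⟩ := (hp2 d hdpos).mp hd2
      have hddvd : d ∣ n := Int.dvd_of_emod_eq_zero hmodd
      have hqmul : n / d * d = n := Int.ediv_mul_cancel hddvd
      have hqpos : 0 < n / d := by
        rcases lt_trichotomy (n / d) 0 with h | h | h
        · nlinarith
        · rw [h] at hqmul; simp at hqmul; omega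
        · exact h
      have hqvb : Vb n (n / d) := ⟨hqpos, ⟨d, hqmul.symm⟩, hq7, hqn, hq10⟩
      simp only [Option.map_some]
      rw [PySem.Int.floordiv_eq_ediv_of_pos hdpos]
      refine ⟨hqvb, fun j hj => ?_⟩
      -- j valid ⇒ j > s ⇒ d' := n / j is in the list with p2 d', and d' earlier (larger) fails
      have hjs := hnone1 j hj
      obtain ⟨hj0, hjdvd, hj7, hjn, hj10⟩ := hj
      have hjmul : n / j * j = n := Int.ediv_mul_cancel hjdvd
      have hd'1 : 1 ≤ n / j := by
        rcases lt_trichotomy (n / j) 0 with h | h | h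
        · nlinarith
        · rw [h] at hjmul; simp at hjmul; omega
        · omega
      have hd'2 : n / j ≤ s := by
        by_contra hcon
        push_neg at hcon
        nlinarith
      have hback : n / (n / j) = j := by
        have h := Int.mul_ediv_cancel_left (a := n / j) j (show n / j ≠ 0 by omega)
        rwa [hjmul] at h
      have hd'mem : n / j ∈ PySem.List.pyRange s 0 (-1) := (hmem2 _).mpr ⟨by omega, hd'2⟩
      have hd'p2 : p2 (n / j) = true := by
        rw [hp2 _ (by omega), hback]
        exact ⟨Int.emod_eq_zero_of_dvd ⟨j, hjmul.symm⟩, hj10, hj7, hjn⟩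
      have hle : n / j ≤ d := by
        rcases hd3 (n / j) hd'mem hd'p2 with h | h
        · omega
        · exact le_of_lt h
      -- d' ≤ d ⇒ n / d ≤ n / d' = j
      have hqmul' := hqmul
      nlinarith [hjmul, hqmul, hle, hqpos, hj0, hdpos, hd'1]
    | none =>
      simp only [Option.map_none]
      intro j hj
      have hjs := hnone1 j hj
      obtain ⟨hj0, hjdvd, hj7, hjn, hj10⟩ := hj
      have hjmul : n / j * j = n := Int.ediv_mul_cancel hjdvd
      have hd'1 : 1 ≤ n / j := by
        rcases lt_trichotomy (n / j) 0 with h | h | h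
        · nlinarith
        · rw [h] at hjmul; simp at hjmul; omega
        · omega
      have hd'2 : n / j ≤ s := by
        by_contra hcon
        push_neg at hcon
        nlinarith
      have hback : n / (n / j) = j := by
        have h := Int.mul_ediv_cancel_left (a := n / j) j (show n / j ≠ 0 by omega)
        rwa [hjmul] at h
      have hd'mem : n / j ∈ PySem.List.pyRange s 0 (-1) := (hmem2 _).mpr ⟨by omega, hd'2⟩
      have hd'p2 : p2 (n / j) = true := by
        rw [hp2 _ (by omega), hback]
        exact ⟨Int.emod_eq_zero_of_dvd ⟨j, hjmul.symm⟩, hj10, hj7, hjn⟩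
      have := hfirst2.2 hf2 (n / j) hd'mem
      rw [hd'p2] at this
      exact absurd this (by simp)

-- ===== VERDICT (by name: the statement is the Claim_ definition above) =====
theorem has_valid_divisor_spec : Claim_equal_has_valid_divisor := by
  intro n _ hpre
  unfold Spec_has_valid_divisor
  unfold Pre_has_valid_divisor at hpre
  by_cases h0 : n = 0
  · subst h0; decide
  by_cases h1 : n = 1
  · subst h1; decide
  have hn : 2 ≤ n := by omega
  exact minopt_unique (A_char n (by omega)) (B_char n hn)
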